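-- pv_equiv track=rewrite | github.com/jinarma/Python_General | librarianLinearSearch.py | totalSearchTime
-- ===== SOURCE A (Python) =====
-- def totalSearchTime(books_list, books_to_find):
-- 	total_time = 0
-- 	for i, book in enumerate(books_to_find):
-- 		for j, check in enumerate(books_list):
-- 			if book == check:
-- 				total_time += j
-- 				break
-- 			else:
-- 				continue
-- 	return total_time
-- ===== SOURCE B (Python) =====
-- def totalSearchTime(books_list, books_to_find):
--     # one pass: frequency table of queries, then a single enumerate scan with
--     # a 'seen' set; the first occurrence of each book contributes index * count
--     counts = {}
--     for book in books_to_find: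
--         counts[book] = counts.get(book, 0) + 1
--     seen = set()
--     total = 0
--     for j, book in enumerate(books_list):
--         if book not in seen:
--             seen.add(book)
--             total += j * counts.get(book, 0)
--     return total
-- ===== Notes on version B (the rewrite author's own statement) =====
-- stated objective: faster
-- what changed: Inverts the traversal: instead of rescanning books_list for every query, B counts the queries in a dict and makes a single enumerate pass over books_list with a seen-set, adding index * count at each first occurrence.
import Mathlib
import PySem

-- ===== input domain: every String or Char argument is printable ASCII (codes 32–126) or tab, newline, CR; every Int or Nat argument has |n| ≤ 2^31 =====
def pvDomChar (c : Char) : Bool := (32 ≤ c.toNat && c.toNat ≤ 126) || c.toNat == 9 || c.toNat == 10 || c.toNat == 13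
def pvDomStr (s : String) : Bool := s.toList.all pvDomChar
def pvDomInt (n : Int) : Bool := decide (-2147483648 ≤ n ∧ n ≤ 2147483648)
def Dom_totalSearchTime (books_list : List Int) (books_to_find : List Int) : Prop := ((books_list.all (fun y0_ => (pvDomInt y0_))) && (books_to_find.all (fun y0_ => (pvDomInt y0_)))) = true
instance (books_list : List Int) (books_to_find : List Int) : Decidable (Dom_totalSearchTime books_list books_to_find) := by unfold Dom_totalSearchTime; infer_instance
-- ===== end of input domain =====

-- B replaces A's per-query rescans by one counting pass over the queries plus one
-- enumerate pass over the list with a seen-set (objective: faster, O(n*m) -> O(n+m)).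

-- ===== PORT A =====
-- A's inner loop: scan enumerate(books_list), return the index added at the break (0 if no match)
def pvFind (pairs : List (Int × Int)) (book : Int) : Int :=
  match pairs with
  | [] => 0
  | (j, check) :: rest => if book == check then j else pvFind rest book

def totalSearchTime (books_list : List Int) (books_to_find : List Int) : Int :=
  books_to_find.foldl
    (fun total_time book => total_time + pvFind (PySem.List.enumerate books_list) book) 0

-- ===== PORT B =====
-- B's per-element step of the single pass (seen-set, running total), with the counts dict fixed
def pvStep (counts : PySem.Dict Int Int) (st : PySem.Set Int × Int) (p : Int × Int) :
    PySem.Set Int × Int :=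
  if st.1.contains p.2 then st
  else (st.1.add p.2, st.2 + p.1 * counts.getD p.2 0)

def totalSearchTime_alt (books_list : List Int) (books_to_find : List Int) : Int :=
  let counts := books_to_find.foldl
    (fun d book => d.insert book (d.getD book 0 + 1)) PySem.Dict.empty
  ((PySem.List.enumerate books_list).foldl (pvStep counts) (PySem.Set.empty, 0)).2

-- ===== PRECONDITION & SPEC =====
def Spec_totalSearchTime (books_list : List Int) (books_to_find : List Int) (out : Int) : Prop := out = totalSearchTime_alt books_list books_to_find
instance (books_list : List Int) (books_to_find : List Int) (out : Int) : Decidable (Spec_totalSearchTime books_list books_to_find out) := by unfold Spec_totalSearchTime; infer_instance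

-- ===== CLAIM (what is proved, stated in full; the proofs are below) =====
def Claim_equal_totalSearchTime : Prop := ∀ (books_list : List Int) (books_to_find : List Int), Dom_totalSearchTime books_list books_to_find → Spec_totalSearchTime books_list books_to_find (totalSearchTime books_list books_to_find)

-- ===== LEMMAS AND PROOFS =====

-- the running total is additive: shifting the accumulator shifts the result
theorem pvStep_shift (counts : PySem.Dict Int Int) (l : List (Int × Int))
    (s : PySem.Set Int) (t x : Int) :
    l.foldl (pvStep counts) (s, t + x)
      = ((l.foldl (pvStep counts) (s, t)).1, (l.foldl (pvStep counts) (s, t)).2 + x) := by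
  induction l generalizing s t with
  | nil => rfl
  | cons p rest ih =>
    by_cases h : p.2 ∈ s
    · simp [pvStep, h, ih]
    · simp only [List.foldl_cons, pvStep, PySem.Set.contains_eq_listContains,
        List.contains_iff_mem, h, if_false]
      rw [show t + x + p.1 * counts.getD p.2 0 = (t + p.1 * counts.getD p.2 0) + x by ring]
      exact ih _ _

-- with an empty counts dict every contribution is 0
theorem pvStep_empty (l : List (Int × Int)) (s : PySem.Set Int) (t : Int) :
    (l.foldl (pvStep (PySem.Dict.empty : PySem.Dict Int Int)) (s, t)).2 = t := by
  induction l generalizing s t with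
  | nil => rfl
  | cons p rest ih =>
    by_cases h : p.2 ∈ s <;>
      simp [pvStep, h, PySem.Dict.getD_empty, ih]

-- bumping one key's count raises the pass's total by exactly the first index of that key
theorem pvStep_insert (l : List (Int × Int)) (s : PySem.Set Int) (t : Int)
    (d : PySem.Dict Int Int) (b : Int) :
    (l.foldl (pvStep (d.insert b (d.getD b 0 + 1))) (s, t)).2
      = (l.foldl (pvStep d) (s, t)).2 + (if b ∈ s then 0 else pvFind l b) := by
  induction l generalizing s t with
  | nil => simp [pvFind]
  | cons p rest ih =>
    obtain ⟨j, c⟩ := p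
    by_cases hc : c ∈ s
    · -- c already seen: both sides skip; b = c would mean b is seen too
      simp only [List.foldl_cons, pvStep, PySem.Set.contains_eq_listContains,
        List.contains_iff_mem, hc, if_true]
      rw [ih]
      by_cases hb : b = c
      · subst hb; simp [hc]
      · simp [pvFind, beq_iff_eq, hb]
    · simp only [List.foldl_cons, pvStep, PySem.Set.contains_eq_listContains,
        List.contains_iff_mem, hc, if_false]
      by_cases hb : b = c
      · -- first occurrence of b itself: contribution grows by j
        subst hb
        rw [PySem.Dict.getD_insert, if_pos rfl]
        rw [show t + j * (d.getD b 0 + 1) = (t + j * d.getD b 0) + j by ring]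
        rw [pvStep_shift, ih]
        simp [hc, pvFind]
      · -- a different book: identical step, recurse
        rw [PySem.Dict.getD_insert, if_neg (fun h => hb h.symm), ih]
        simp [pvFind, PySem.Set.mem_add, beq_iff_eq, hb]

theorem totalSearchTime_eq (books_list : List Int) (books_to_find : List Int) :
    totalSearchTime books_list books_to_find = totalSearchTime_alt books_list books_to_find := by
  induction books_to_find using List.reverseRecOn with
  | nil =>
    simp [totalSearchTime, totalSearchTime_alt, pvStep_empty]
  | append_singleton bf b ih =>
    simp only [totalSearchTime, totalSearchTime_alt, List.foldl_append, List.foldl_cons,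
      List.foldl_nil] at *
    rw [pvStep_insert]
    simp only [show (PySem.Set.empty : PySem.Set Int) = [] from rfl, List.not_mem_nil,
      if_false, ih]

-- ===== VERDICT (by name: the statement is the Claim_ definition above) =====
theorem totalSearchTime_spec : Claim_equal_totalSearchTime := by
  intro bl bf _
  unfold Spec_totalSearchTime
  exact totalSearchTime_eq bl bf
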